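-- pv_equiv track=rewrite | github.com/xbmc/repo-plugins | plugin.video.zdf_de_2016/addon.py | _getFormatMessage
-- ===== SOURCE A (Python) =====
-- def _getFormatMessage(message):
--     j = message.find('{}')
--     if j == -1:
--         return message
--     formatMessage = ''
--     i = 0
--     index = 0;
--     while j != -1:
--         formatMessage += message[i:j] + "{" + str(index) + "}"
--         i = j + len("{}")
--         j = message.find('{}', i)
--         index += 1
--     formatMessage += message[i:]
--     return formatMessage
-- ===== SOURCE B (Python) =====
-- def _getFormatMessage(message):
--     parts = message.split('{}')
--     out = ''
--     for i, p in enumerate(parts):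
--         if i != 0:
--             out += '{' + str(i - 1) + '}'
--         out += p
--     return out
-- ===== Notes on version B (the rewrite author's own statement) =====
-- stated objective: idiomatic
-- what changed: Replaces the cursor/find while-loop that scans for each '{}' with a split('{}') followed by a single enumerate pass that interleaves the indexed placeholders between the segments.
import Mathlib
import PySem

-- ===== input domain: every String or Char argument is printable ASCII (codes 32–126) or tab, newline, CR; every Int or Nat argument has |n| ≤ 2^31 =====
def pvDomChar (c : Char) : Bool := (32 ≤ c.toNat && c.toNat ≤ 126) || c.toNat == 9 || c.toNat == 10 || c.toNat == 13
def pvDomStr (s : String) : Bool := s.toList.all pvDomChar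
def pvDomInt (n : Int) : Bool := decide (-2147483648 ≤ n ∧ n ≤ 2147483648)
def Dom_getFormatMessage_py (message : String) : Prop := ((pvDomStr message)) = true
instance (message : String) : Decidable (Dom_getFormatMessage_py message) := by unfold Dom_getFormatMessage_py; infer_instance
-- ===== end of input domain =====

-- B replaces A's cursor/find while-loop with split('{}') and a single enumerate pass (idiomatic; same cost).

-- ===== PORT A =====
-- termination fact for the while loop: a find start past the end of the string yields -1
theorem pvFindFrom_gt_len (s sub : List Char) (k : Nat) (hk : s.length < k) :
    PySem.Chars.findFrom s sub (k : Int) none = -1 := by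
  unfold PySem.Chars.findFrom
  have h1 : ¬ ((k : Int) < 0) := by omega
  simp only [h1, if_false]
  rw [if_pos (by exact_mod_cast hk)]

-- the 'while j != -1' loop of _getFormatMessage; state: i (cursor), index, and the accumulated formatMessage
def gfmLoopA (s : List Char) (i : Nat) (index : Int) (acc : List Char) : List Char :=
  let j := PySem.Chars.findFrom s ['{', '}'] (i : Int) none
  if _h : j = -1 then
    acc ++ PySem.Chars.slice s (some (i : Int)) none
  else
    gfmLoopA s (j.toNat + 2) (index + 1)
      (acc ++ PySem.Chars.slice s (some (i : Int)) (some j)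
           ++ ['{'] ++ (PySem.Int.toStr index).toList ++ ['}'])
termination_by s.length + 2 - i
decreasing_by
  by_cases hle : i ≤ s.length
  · have hs := (PySem.Chars.findFrom_natCast_spec s ['{','}'] i hle _h).1
    omega
  · exact absurd (pvFindFrom_gt_len s ['{','}'] i (by omega)) _h

def getFormatMessage_py (message : String) : String :=
  let j := PySem.Str.find message "{}"
  if j = -1 then message
  else String.ofList (gfmLoopA message.toList 0 0 [])

-- ===== PORT B =====
def getFormatMessage_py_alt (message : String) : String :=
  let parts := PySem.Chars.splitOn message.toList ['{', '}']
  String.ofList ((PySem.List.enumerate parts 0).foldl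
    (fun out ip =>
      (if ip.1 ≠ 0 then out ++ ['{'] ++ (PySem.Int.toStr (ip.1 - 1)).toList ++ ['}'] else out) ++ ip.2)
    [])

-- ===== PRECONDITION & SPEC =====
def Spec_getFormatMessage_py (message : String) (out : String) : Prop := out = getFormatMessage_py_alt message
instance (message : String) (out : String) : Decidable (Spec_getFormatMessage_py message out) := by unfold Spec_getFormatMessage_py; infer_instance

-- ===== CLAIM (what is proved, stated in full; the proofs are below) =====
def Claim_equal_getFormatMessage_py : Prop := ∀ (message : String), Dom_getFormatMessage_py message → Spec_getFormatMessage_py message (getFormatMessage_py message)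

-- ===== LEMMAS AND PROOFS =====
-- placeholder rendered after a segment: '{' ++ str(idx) ++ '}'
def ph (idx : Int) : List Char := ['{'] ++ (PySem.Int.toStr idx).toList ++ ['}']

def pvPieces : List Char → List (List Char)
  | [] => [[]]
  | c :: rest =>
    if ['{','}'].isPrefixOf (c :: rest) then [] :: pvPieces (rest.drop 1)
    else (pvPieces rest).modifyHead (c :: ·)
termination_by l => l.length
decreasing_by all_goals simp

theorem pvPieces_ne_nil (l : List Char) : pvPieces l ≠ [] := by
  induction l using pvPieces.induct with
  | case1 => simp [pvPieces]
  | case2 c rest h ih => simp [pvPieces, h]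
  | case3 c rest h ih =>
    simp only [pvPieces, if_neg h]
    cases hp : pvPieces rest with
    | nil => exact absurd hp ih
    | cons a t => simp

-- no occurrence anywhere: pieces l = [l]
theorem pvPieces_of_no_occ (l : List Char) (h : ∀ i, ¬ ['{','}'] <+: l.drop i) :
    pvPieces l = [l] := by
  induction l using pvPieces.induct with
  | case1 => simp [pvPieces]
  | case2 c rest hpre ih =>
    exact absurd (List.isPrefixOf_iff_prefix.mp hpre) (by simpa using h 0)
  | case3 c rest hpre ih =>
    simp only [pvPieces, if_neg hpre]
    rw [ih (fun i => by simpa using h (i+1))]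
    simp

-- first occurrence at j: pieces l = l.take j :: pieces (l.drop (j+2))
theorem pvPieces_first_occ (l : List Char) (j : Nat)
    (hj : ['{','}'] <+: l.drop j) (hmin : ∀ i < j, ¬ ['{','}'] <+: l.drop i) :
    pvPieces l = l.take j :: pvPieces (l.drop (j + 2)) := by
  induction l using pvPieces.induct generalizing j with
  | case1 =>
    exfalso
    have := hj.length_le
    simp at this
  | case2 c rest hpre ih =>
    have hj0 : j = 0 := by
      by_contra hne
      exact hmin 0 (by omega) (by simpa using List.isPrefixOf_iff_prefix.mp hpre)
    subst hj0
    simp only [pvPieces, if_pos hpre]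
    simp [List.drop_succ_cons]
  | case3 c rest hpre ih =>
    have hj0 : j ≠ 0 := by
      intro h0; subst h0
      exact hpre (List.isPrefixOf_iff_prefix.mpr (by simpa using hj))
    obtain ⟨j', rfl⟩ : ∃ j', j = j' + 1 := ⟨j - 1, by omega⟩
    simp only [pvPieces, if_neg hpre]
    rw [ih j' (by simpa using hj) (fun i hi => by simpa using hmin (i+1) (by omega))]
    simp [List.take_succ_cons, List.drop_succ_cons]

def pvRender (t : List Char) (idx : Int) : List Char :=
  let j := PySem.Chars.find t ['{','}']
  if h : j = -1 then t
  else t.take j.toNat ++ ph idx ++ pvRender (t.drop (j.toNat + 2)) (idx + 1)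
termination_by t.length
decreasing_by
  have h0 : 0 ≤ PySem.Chars.find t ['{','}'] := by
    have := PySem.Chars.neg_one_le_find t ['{','}']
    omega
  have hpre := (PySem.Chars.find_spec h0).1
  have h2 := hpre.length_le
  rw [List.length_drop] at h2
  simp at h2
  rw [List.length_drop]
  omega

def pvBJoin : List (List Char) → Int → List Char
  | [], _ => []
  | [p], _ => p
  | p :: q :: r, idx => p ++ ph idx ++ pvBJoin (q :: r) (idx + 1)

theorem pvBJoin_cons (p : List Char) (ps : List (List Char)) (hps : ps ≠ []) (idx : Int) :
    pvBJoin (p :: ps) idx = p ++ ph idx ++ pvBJoin ps (idx + 1) := by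
  cases ps with
  | nil => exact absurd rfl hps
  | cons q r => rfl

theorem pvRender_eq_bJoin (t : List Char) (idx : Int) :
    pvRender t idx = pvBJoin (pvPieces t) idx := by
  fun_induction pvRender t idx with
  | case1 t idx j hj =>
    have hinf : ¬ ['{','}'] <:+: t := (PySem.Chars.find_eq_neg_one_iff t ['{','}']).mp hj
    rw [pvPieces_of_no_occ t (fun i hp => hinf (hp.isInfix.trans (List.drop_suffix i t).isInfix))]
    rfl
  | case2 t idx j hj ih =>
    have h0 : 0 ≤ PySem.Chars.find t ['{','}'] := by
      have := PySem.Chars.neg_one_le_find t ['{','}']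
      omega
    have hspec := PySem.Chars.find_spec h0
    rw [pvPieces_first_occ t (PySem.Chars.find t ['{','}']).toNat hspec.1 hspec.2,
        pvBJoin_cons _ _ (pvPieces_ne_nil _), ih]

theorem pvModifyHead_congr {f g : List Char → List Char} (h : ∀ x, f x = g x)
    (l : List (List Char)) : l.modifyHead f = l.modifyHead g := by
  cases l <;> simp [h]

theorem pvSplitGo (fuel : Nat) (l cur : List Char) (acc : List (List Char)) (hf : l.length ≤ fuel) :
    PySem.Chars.splitOn.go ['{','}'] fuel l cur acc
      = acc.reverse ++ (pvPieces l).modifyHead (cur.reverse ++ ·) := by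
  induction fuel generalizing l cur acc with
  | zero =>
    have : l = [] := by simpa using hf
    subst this
    simp [PySem.Chars.splitOn.go, pvPieces]
  | succ f ih =>
    cases l with
    | nil => simp [PySem.Chars.splitOn.go, pvPieces]
    | cons c rest =>
      by_cases hpre : ['{','}'].isPrefixOf (c :: rest)
      · rw [PySem.Chars.splitOn.go]
        simp only [if_pos hpre]
        rw [ih _ _ _ (by simp at hf ⊢; omega)]
        simp only [pvPieces, if_pos hpre]
        simp [List.drop_succ_cons, pvModifyHead_congr (fun x => by simp : ∀ x : List Char, x = id x)]
      · rw [PySem.Chars.splitOn.go]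
        simp only [if_neg hpre]
        rw [ih _ _ _ (by simp at hf ⊢; omega)]
        simp only [pvPieces, if_neg hpre]
        rw [List.modifyHead_modifyHead]
        exact congrArg (acc.reverse ++ ·) (pvModifyHead_congr (fun x => by simp) _)

theorem pvSplitOn_eq_pieces (l : List Char) :
    PySem.Chars.splitOn l ['{','}'] = pvPieces l := by
  unfold PySem.Chars.splitOn
  rw [pvSplitGo _ _ _ _ (by omega)]
  simp
  cases h : pvPieces l with
  | nil => exact absurd h (pvPieces_ne_nil l)
  | cons a t => simp

theorem gfmLoopA_eq (s : List Char) (i : Nat) (hi : i ≤ s.length) (index : Int) (acc : List Char) :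
    gfmLoopA s i index acc = acc ++ pvRender (s.drop i) index := by
  fun_induction gfmLoopA s i index acc with
  | case1 i index acc j hj =>
    have hfind : PySem.Chars.find (s.drop i) ['{','}'] = -1 := by
      rw [PySem.Chars.find_eq_neg_one_iff]
      exact (PySem.Chars.findFrom_natCast_eq_neg_one_iff s ['{','}'] i hi).mp hj
    rw [pvRender]
    simp only [hfind, dif_pos]
    rw [PySem.Chars.slice_eq_listSlice, PySem.List.slice_from_natCast]
  | case2 i index acc j hj ih =>
    have hf0 : 0 ≤ PySem.Chars.find (s.drop i) ['{','}'] := by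
      by_contra hneg
      have : PySem.Chars.find (s.drop i) ['{','}'] = -1 := by
        have := PySem.Chars.neg_one_le_find (s.drop i) ['{','}']
        omega
      exact hj (by
        rw [PySem.Chars.findFrom_natCast_eq_neg_one_iff s ['{','}'] i hi]
        exact (PySem.Chars.find_eq_neg_one_iff _ _).mp this)
    have hjval : PySem.Chars.findFrom s ['{','}'] (i : Int) none
        = (i : Int) + PySem.Chars.find (s.drop i) ['{','}'] := by
      rw [PySem.Chars.findFrom_natCast s ['{','}'] i hi]
      rw [if_neg (by omega)]
    have hspec := PySem.Chars.find_spec hf0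
    have hpre := hspec.1
    have hlen2 : 2 ≤ ((s.drop i).drop (PySem.Chars.find (s.drop i) ['{','}']).toNat).length := by
      simpa using hpre.length_le
    rw [List.drop_drop] at hlen2
    rw [List.length_drop] at hlen2
    have hflen : (PySem.Chars.find (s.drop i) ['{','}']).toNat ≤ (s.drop i).length := by
      have := PySem.Chars.find_le_length (s.drop i) ['{','}']
      simp only [List.length_drop]
      omega
    have htn : (PySem.Chars.findFrom s ['{','}'] (i : Int) none).toNat
        = i + (PySem.Chars.find (s.drop i) ['{','}']).toNat := by
      rw [hjval]; omega
    rw [ih (by omega)]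
    conv_rhs => rw [pvRender]
    rw [dif_neg (by omega : ¬ PySem.Chars.find (s.drop i) ['{','}'] = -1)]
    rw [PySem.Chars.slice_eq_listSlice, PySem.List.slice_toNat _ (by omega) (by omega)]
    rw [htn, List.drop_drop]
    simp only [Int.toNat_natCast, Nat.add_sub_cancel_left]
    simp [ph, ← Nat.add_assoc]
def pvTailRender : List (List Char) → Int → List Char
  | [], _ => []
  | p :: ps, k => ph (k - 1) ++ p ++ pvTailRender ps (k + 1)

theorem pvFoldB (ps : List (List Char)) (k : Int) (hk : 1 ≤ k) (acc : List Char) :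
    (PySem.List.enumerate ps k).foldl
      (fun out ip =>
        (if ip.1 ≠ 0 then out ++ ['{'] ++ (PySem.Int.toStr (ip.1 - 1)).toList ++ ['}'] else out) ++ ip.2)
      acc = acc ++ pvTailRender ps k := by
  induction ps generalizing k acc with
  | nil => simp [PySem.List.enumerate_nil, pvTailRender]
  | cons p ps ih =>
    rw [PySem.List.enumerate_cons, List.foldl_cons]
    simp only [show k ≠ 0 by omega, ne_eq, not_false_iff, if_true]
    rw [ih (k+1) (by omega)]
    simp [pvTailRender, ph, List.append_assoc]

theorem pvTailRender_bJoin (ps : List (List Char)) (p : List Char) (k : Int) :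
    p ++ pvTailRender ps (k + 1) = pvBJoin (p :: ps) k := by
  induction ps generalizing p k with
  | nil => simp [pvTailRender, pvBJoin]
  | cons q r ih =>
    rw [pvBJoin_cons _ _ (by simp) k]
    rw [pvTailRender]
    rw [← ih q (k + 1)]
    simp [List.append_assoc]

theorem pvAlt_eq (message : String) :
    getFormatMessage_py_alt message = String.ofList (pvBJoin (pvPieces message.toList) 0) := by
  unfold getFormatMessage_py_alt
  dsimp only
  rw [pvSplitOn_eq_pieces]
  cases h : pvPieces message.toList with
  | nil => exact absurd h (pvPieces_ne_nil _)
  | cons p ps =>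
    rw [PySem.List.enumerate_cons, List.foldl_cons]
    rw [if_neg (by simp), List.nil_append]
    rw [pvFoldB ps (0 + 1) (by omega) p, pvTailRender_bJoin]

theorem pvA_eq (message : String) :
    getFormatMessage_py message = String.ofList (pvRender message.toList 0) := by
  unfold getFormatMessage_py
  have hfind : PySem.Str.find message "{}" = PySem.Chars.find message.toList ['{','}'] := by
    simp [PySem.Str.find_eq]
  by_cases h : PySem.Str.find message "{}" = -1
  · rw [if_pos h]
    rw [pvRender, dif_pos (by rw [← hfind]; exact h)]
    simp
  · rw [if_neg h]
    rw [gfmLoopA_eq message.toList 0 (by omega) 0 []]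
    simp

-- ===== VERDICT (by name: the statement is the Claim_ definition above) =====
theorem getFormatMessage_py_spec : Claim_equal_getFormatMessage_py := by
  intro message _
  unfold Spec_getFormatMessage_py
  rw [pvA_eq, pvAlt_eq, pvRender_eq_bJoin]
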